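-- pv_equiv track=rewrite | github.com/RandBerth/Matedis | Clase 1_ Logica Proposicional/Chatbot - Interfaz Web/Reglas_inferencia.py | hypothetical_syllogism
-- ===== SOURCE A (Python) =====
-- def hypothetical_syllogism(premises):
--     """
--     Descripción: Verifica si se cumple la regla de inferencia Silogismo Hipotético.
--     Args:
--         premises (str): Premisas a evaluar.
--
--     Returns:
--         str: Conclusión inferida o None
--     """
--     for premise1 in premises:
--         if "entonces" in premise1:
--             antecedent1, consequent1 = premise1.split("entonces")
--             antecedent1 = antecedent1.replace("si", "").strip()
--             consequent1 = consequent1.strip()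
--             for premise2 in premises:
--                 if premise1 != premise2 and "entonces" in premise2:
--                     antecedent2, consequent2 = premise2.split("entonces")
--                     antecedent2 = antecedent2.replace("si", "").strip()
--                     consequent2 = consequent2.strip()
--                     p_label = f"P: {antecedent1.capitalize()}"
--                     q_label = f"Q: {consequent1.capitalize()}"
--                     r_label = f"R: {consequent2.capitalize()}"
--                     cls_label = f"Conclusión: {antecedent1.capitalize()} entonces {consequent2}"
--                     if consequent1 == antecedent2:
--                         return f"\u00BB {p_label}\n\u00BB {q_label}\n\u00BB {r_label}\n\u2234 {cls_label}\n"
--     return None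
-- ===== SOURCE B (Python) =====
-- def hypothetical_syllogism(premises):
--     """Same result as A: parse each premise once, index candidates by antecedent."""
--     parsed = []
--     for p in premises:
--         parts = p.split("entonces")
--         if len(parts) == 2:
--             parsed.append((p, parts[0].replace("si", "").strip(), parts[1].strip()))
--     index = {}
--     for p, a, c in parsed:
--         index.setdefault(a, []).append((p, c))
--     for p1, a1, c1 in parsed:
--         for p2, c2 in index.get(c1, []):
--             if p2 != p1:
--                 ca1 = a1.capitalize()
--                 return (f"\u00BB P: {ca1}\n\u00BB Q: {c1.capitalize()}\n"
--                         f"\u00BB R: {c2.capitalize()}\n"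
--                         f"\u2234 Conclusi\u00F3n: {ca1} entonces {c2}\n")
--     return None
-- ===== Notes on version B (the rewrite author's own statement) =====
-- stated objective: alternative
-- what changed: B parses every premise exactly once into (premise, antecedent, consequent) triples and builds a dict from antecedent to its candidate (premise, consequent) list, then resolves each consequent by one dict lookup, replacing A's nested loop that re-splits, re-replaces and re-strips every premise for every outer premise; on the random timing inputs (few conditionals) this is not measurably faster.
import Mathlib
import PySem

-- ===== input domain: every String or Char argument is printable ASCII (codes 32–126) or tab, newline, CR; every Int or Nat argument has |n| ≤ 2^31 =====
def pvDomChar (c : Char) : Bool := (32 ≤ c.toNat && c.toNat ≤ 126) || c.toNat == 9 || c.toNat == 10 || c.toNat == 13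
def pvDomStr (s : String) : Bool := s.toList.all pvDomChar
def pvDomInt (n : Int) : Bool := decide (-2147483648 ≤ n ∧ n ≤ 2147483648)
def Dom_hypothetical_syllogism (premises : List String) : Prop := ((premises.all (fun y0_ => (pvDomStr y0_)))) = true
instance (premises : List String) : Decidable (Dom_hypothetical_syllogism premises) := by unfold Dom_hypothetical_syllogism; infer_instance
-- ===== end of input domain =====

-- B replaces A's nested loop (which re-splits and re-strips every premise pair) by one parsing
-- pass plus a dict keyed by antecedent, looked up with each consequent; same return value.

-- Python str.capitalize(): first char uppercased, rest lowercased — exact on the ASCII domain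
def pvCap (s : String) : String :=
  match s.toList with
  | [] => ""
  | c :: rest => String.mk (PySem.Chars.upper [c] ++ PySem.Chars.lower rest)

-- the f-string both Pythons return (identical literal in Source A and Source B)
def pvMsg (a1 c1 c2 : String) : String :=
  "\u00BB P: " ++ pvCap a1 ++ "\n\u00BB Q: " ++ pvCap c1 ++ "\n\u00BB R: " ++ pvCap c2 ++
    "\n\u2234 Conclusi\u00F3n: " ++ pvCap a1 ++ " entonces " ++ c2 ++ "\n"

-- ===== PORT A =====
-- inner 'for premise2 in premises' loop of A
def hsInnerA (plist : List String) (premise1 antecedent1 consequent1 : String) : Option String :=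
  match plist with
  | [] => none
  | premise2 :: rest =>
    if premise1 ≠ premise2 ∧ PySem.Str.isIn "entonces" premise2 = true then
      match PySem.Str.split? premise2 "entonces" with
      | some [a2, c2] =>
        let antecedent2 := PySem.Str.strip (PySem.Str.replace a2 "si" "")
        let consequent2 := PySem.Str.strip c2
        if consequent1 == antecedent2 then some (pvMsg antecedent1 consequent1 consequent2)
        else hsInnerA rest premise1 antecedent1 consequent1
      | _ => none  -- Python raises ValueError here (unpacking ≠ 2 parts); outside Pre_
    else hsInnerA rest premise1 antecedent1 consequent1

-- outer 'for premise1 in premises' loop of A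
def hsOuterA (plist all : List String) : Option String :=
  match plist with
  | [] => none
  | premise1 :: rest =>
    if PySem.Str.isIn "entonces" premise1 = true then
      match PySem.Str.split? premise1 "entonces" with
      | some [a1, c1] =>
        let antecedent1 := PySem.Str.strip (PySem.Str.replace a1 "si" "")
        let consequent1 := PySem.Str.strip c1
        match hsInnerA all premise1 antecedent1 consequent1 with
        | some r => some r
        | none => hsOuterA rest all
      | _ => none  -- Python raises ValueError here; outside Pre_
    else hsOuterA rest all

def hypothetical_syllogism (premises : List String) : Option String :=
  hsOuterA premises premises

-- ===== PORT B =====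
-- Source B first loop: parse each premise once into (premise, antecedent, consequent)
def hsParse (plist : List String) : List (String × String × String) :=
  match plist with
  | [] => []
  | p :: rest =>
    match PySem.Str.split? p "entonces" with
    | some [a, c] =>
      (p, PySem.Str.strip (PySem.Str.replace a "si" ""), PySem.Str.strip c) :: hsParse rest
    | _ => hsParse rest

-- Source B second loop: index.setdefault(a, []).append((p, c))
def hsIndex (parsed : List (String × String × String)) :
    PySem.Dict String (List (String × String)) :=
  parsed.foldl (fun d t => d.insert t.2.1 (d.getD t.2.1 [] ++ [(t.1, t.2.2)])) PySem.Dict.empty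

-- Source B inner 'for p2, c2 in index.get(c1, [])' loop
def hsLookup (cands : List (String × String)) (p1 a1 c1 : String) : Option String :=
  match cands with
  | [] => none
  | (p2, c2) :: rest => if p2 ≠ p1 then some (pvMsg a1 c1 c2) else hsLookup rest p1 a1 c1

-- Source B outer 'for p1, a1, c1 in parsed' loop
def hsOuterB (parsed : List (String × String × String))
    (index : PySem.Dict String (List (String × String))) : Option String :=
  match parsed with
  | [] => none
  | (p1, a1, c1) :: rest =>
    match hsLookup (index.getD c1 []) p1 a1 c1 with
    | some r => some r
    | none => hsOuterB rest index

def hypothetical_syllogism_alt (premises : List String) : Option String :=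
  hsOuterB (hsParse premises) (hsIndex (hsParse premises))

-- ===== PRECONDITION & SPEC =====
-- Pre_ excludes lists containing a premise in which "entonces" occurs more than once: on such
-- premises A's two-name tuple unpacking raises ValueError. (Stated via split?: a premise
-- mentioning "entonces" splits into exactly two pieces, any other into one — the latter half
-- is true of every string and only aligns the two ports' guards checkably.)
def Pre_hypothetical_syllogism (premises : List String) : Prop :=
  ∀ p ∈ premises,
    ((PySem.Str.split? p "entonces").getD []).length =
      (if PySem.Str.isIn "entonces" p then 2 else 1)
instance (premises : List String) : Decidable (Pre_hypothetical_syllogism premises) := by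
  unfold Pre_hypothetical_syllogism; infer_instance

def pvWitness_hypothetical_syllogism : List String := ["si a entonces b", "si b entonces c"]

def Spec_hypothetical_syllogism (premises : List String) (out : Option String) : Prop :=
  out = hypothetical_syllogism_alt premises
instance (premises : List String) (out : Option String) :
    Decidable (Spec_hypothetical_syllogism premises out) := by
  unfold Spec_hypothetical_syllogism; infer_instance

-- ===== CLAIM (what is proved, stated in full; the proofs are below) =====
def Claim_equal_hypothetical_syllogism : Prop :=
  ∀ (premises : List String), Dom_hypothetical_syllogism premises →
    Pre_hypothetical_syllogism premises →
      Spec_hypothetical_syllogism premises (hypothetical_syllogism premises)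

-- ===== LEMMAS AND PROOFS =====

-- per-premise reading of Pre_
def pvPremOk (p : String) : Prop :=
  ((PySem.Str.split? p "entonces").getD []).length =
    (if PySem.Str.isIn "entonces" p then 2 else 1)

theorem pvPremOk_pos {p : String} (h : pvPremOk p) (hin : PySem.Str.isIn "entonces" p = true) :
    ∃ a c, PySem.Str.split? p "entonces" = some [a, c] := by
  unfold pvPremOk at h
  rw [hin, if_pos rfl] at h
  cases hs : PySem.Str.split? p "entonces" with
  | none => rw [hs] at h; simp at h
  | some l =>
    rw [hs] at h; simp at h
    match l, h with
    | [a, c], _ => exact ⟨a, c, rfl⟩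

theorem pvPremOk_neg {p : String} (h : pvPremOk p) (hin : PySem.Str.isIn "entonces" p = false) :
    ∃ x, PySem.Str.split? p "entonces" = some [x] := by
  unfold pvPremOk at h
  rw [hin] at h; simp at h
  cases hs : PySem.Str.split? p "entonces" with
  | none => rw [hs] at h; simp at h
  | some l =>
    rw [hs] at h; simp at h
    match l, h with
    | [x], _ => exact ⟨x, rfl⟩

-- proof-only model of B's inner search, done directly on the parsed list
def pvScan (parsed : List (String × String × String)) (p1 a1 c1 : String) : Option String :=
  match parsed with
  | [] => none
  | (p2, a2, c2) :: rest =>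
    if p1 ≠ p2 ∧ c1 == a2 then some (pvMsg a1 c1 c2) else pvScan rest p1 a1 c1

-- A's inner loop equals the scan over the parsed list
theorem innerA_eq_scan (l : List String) (hl : ∀ p ∈ l, pvPremOk p) (p1 a1 c1 : String) :
    hsInnerA l p1 a1 c1 = pvScan (hsParse l) p1 a1 c1 := by
  induction l with
  | nil => rfl
  | cons p rest ih =>
    have hp : pvPremOk p := hl p (List.mem_cons_self ..)
    have hrest : ∀ q ∈ rest, pvPremOk q := fun q hq => hl q (List.mem_cons_of_mem _ hq)
    by_cases hin : PySem.Str.isIn "entonces" p = true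
    · obtain ⟨a, c, hs⟩ := pvPremOk_pos hp hin
      by_cases hne : p1 ≠ p
      · simp only [hsInnerA, hsParse, hs, if_pos (And.intro hne hin), pvScan]
        by_cases heq : (c1 == PySem.Str.strip (PySem.Str.replace a "si" "")) = true
        · rw [if_pos heq, if_pos (And.intro hne heq)]
        · rw [if_neg heq, if_neg (fun h => heq h.2)]
          exact ih hrest
      · push_neg at hne
        subst hne
        simp only [hsInnerA, hsParse, hs, pvScan]
        rw [if_neg (by simp), if_neg (by simp)]
        exact ih hrest
    · have hin' : PySem.Str.isIn "entonces" p = false := by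
        cases h : PySem.Str.isIn "entonces" p
        · rfl
        · exact absurd h hin
      obtain ⟨x, hs⟩ := pvPremOk_neg hp hin'
      have hcond : ¬ (p1 ≠ p ∧ PySem.Str.isIn "entonces" p = true) := fun h => by
        rw [hin'] at h; exact absurd h.2 (by simp)
      simp only [hsInnerA, hsParse, hs]
      rw [if_neg hcond]
      exact ih hrest

-- the dict built by B: each key holds exactly the parsed candidates with that antecedent
theorem getD_hsIndex_foldl (l : List (String × String × String))
    (d : PySem.Dict String (List (String × String))) (k : String) :
    (l.foldl (fun d t => d.insert t.2.1 (d.getD t.2.1 [] ++ [(t.1, t.2.2)])) d).getD k [] =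
      d.getD k [] ++ (l.filter (fun t => t.2.1 == k)).map (fun t => (t.1, t.2.2)) := by
  induction l generalizing d with
  | nil => simp
  | cons t rest ih =>
    simp only [List.foldl_cons, ih, List.filter_cons]
    by_cases hk : t.2.1 = k
    · rw [if_pos (by simpa using hk)]
      subst hk
      simp [List.append_assoc]
    · rw [if_neg (by simpa using hk)]
      rw [PySem.Dict.getD_insert, if_neg (fun h => hk h.symm)]

theorem getD_hsIndex (parsed : List (String × String × String)) (k : String) :
    (hsIndex parsed).getD k [] =
      (parsed.filter (fun t => t.2.1 == k)).map (fun t => (t.1, t.2.2)) := by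
  unfold hsIndex
  rw [getD_hsIndex_foldl]
  simp [PySem.Dict.getD_empty]

-- the scan over the parsed list equals B's lookup in the candidate list of c1
theorem scan_eq_lookup (parsed : List (String × String × String)) (p1 a1 c1 : String) :
    pvScan parsed p1 a1 c1 =
      hsLookup ((parsed.filter (fun t => t.2.1 == c1)).map (fun t => (t.1, t.2.2))) p1 a1 c1 := by
  induction parsed with
  | nil => rfl
  | cons t rest ih =>
    obtain ⟨p2, a2, c2⟩ := t
    simp only [pvScan, List.filter_cons]
    by_cases ha : c1 == a2
    · have ha' : (a2 == c1) = true := by simp only [beq_iff_eq] at ha ⊢; exact ha.symm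
      simp only [ha', if_pos, List.map_cons, hsLookup]
      by_cases hne : p1 ≠ p2
      · rw [if_pos ⟨hne, ha⟩, if_pos (by simpa using hne.symm)]
      · push_neg at hne
        rw [if_neg (by simp [hne]), if_neg (by simp [hne])]
        exact ih
    · have ha' : ¬ (a2 == c1) = true := by
        simp only [beq_iff_eq] at ha ⊢; exact fun h => ha h.symm
      rw [if_neg (by simp [ha]), if_neg ha']
      exact ih

-- A's inner loop equals B's dict lookup
theorem innerA_eq_lookup (premises : List String) (hpre : ∀ p ∈ premises, pvPremOk p)
    (p1 a1 c1 : String) :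
    hsInnerA premises p1 a1 c1 =
      hsLookup ((hsIndex (hsParse premises)).getD c1 []) p1 a1 c1 := by
  rw [innerA_eq_scan premises hpre, getD_hsIndex, scan_eq_lookup]

-- outer loops agree
theorem outerA_eq_outerB (l premises : List String) (hl : ∀ p ∈ l, pvPremOk p)
    (hpre : ∀ p ∈ premises, pvPremOk p) :
    hsOuterA l premises = hsOuterB (hsParse l) (hsIndex (hsParse premises)) := by
  induction l with
  | nil => rfl
  | cons p rest ih =>
    have hp : pvPremOk p := hl p (List.mem_cons_self ..)
    have hrest : ∀ q ∈ rest, pvPremOk q := fun q hq => hl q (List.mem_cons_of_mem _ hq)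
    by_cases hin : PySem.Str.isIn "entonces" p = true
    · obtain ⟨a, c, hs⟩ := pvPremOk_pos hp hin
      simp only [hsOuterA, hsParse, hs, if_pos hin, hsOuterB]
      rw [innerA_eq_lookup premises hpre]
      cases hsLookup ((hsIndex (hsParse premises)).getD (PySem.Str.strip c) []) p
          (PySem.Str.strip (PySem.Str.replace a "si" "")) (PySem.Str.strip c) with
      | none => exact ih hrest
      | some r => rfl
    · have hin' : PySem.Str.isIn "entonces" p = false := by
        cases h : PySem.Str.isIn "entonces" p
        · rfl
        · exact absurd h hin
      obtain ⟨x, hs⟩ := pvPremOk_neg hp hin'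
      simp only [hsOuterA, hsParse, hs, hin']
      rw [if_neg (by simp)]
      exact ih hrest

-- ===== VERDICT (by name: the statement is the Claim_ definition above) =====
theorem hypothetical_syllogism_spec : Claim_equal_hypothetical_syllogism := by
  intro premises _ hpre
  unfold Spec_hypothetical_syllogism hypothetical_syllogism hypothetical_syllogism_alt
  exact outerA_eq_outerB premises premises hpre hpre
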